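-- pv_equiv track=rewrite | github.com/Prakashsingh2007/Flames-webapp | flames_logic.py | flames_relationship
-- ===== SOURCE A (Python) =====
-- def flames_relationship(name1, name2):
--     """
--     Calculate the FLAMES relationship between two names.
--
--     Args:
--         name1 (str): First name
--         name2 (str): Second name
--
--     Returns:
--         str: The relationship result
--     """
--     # Convert to lowercase and remove spaces
--     name1 = name1.lower().replace(" ", "")
--     name2 = name2.lower().replace(" ", "")
--
--     # Remove common characters
--     for char in name1:
--         if char in name2:
--             name1 = name1.replace(char, "", 1)
--             name2 = name2.replace(char, "", 1)
--
--     # Count remaining characters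
--     remaining_count = len(name1) + len(name2)
--
--     # FLAMES list
--     flames = ["Friends", "Love", "Affection", "Marriage", "Enemies", "Siblings"]
--
--     # Eliminate until one remains
--     while len(flames) > 1:
--         # Find the index to eliminate (0-based, wrap around)
--         index = (remaining_count - 1) % len(flames)
--         flames.pop(index)
--
--     return flames[0]
-- ===== SOURCE B (Python) =====
-- def flames_relationship(name1, name2):
--     """FLAMES via a character-count dictionary: one counting pass replaces the
--     nested replace-scan cancellation; elimination is a recursive slice-rebuild."""
--     s1 = name1.lower().replace(" ", "")
--     s2 = name2.lower().replace(" ", "")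
--     counts = {}
--     for c in s2:
--         counts[c] = counts.get(c, 0) + 1
--     common = 0
--     for c in s1:
--         if counts.get(c, 0) > 0:
--             counts[c] = counts[c] - 1
--             common += 1
--     remaining = len(s1) + len(s2) - 2 * common
--
--     def survivor(lst, r):
--         if len(lst) <= 1:
--             return lst[0]
--         i = (r - 1) % len(lst)
--         return survivor(lst[:i] + lst[i + 1:], r)
--
--     return survivor(["Friends", "Love", "Affection", "Marriage", "Enemies", "Siblings"], remaining)
-- ===== Notes on version B (the rewrite author's own statement) =====
-- stated objective: faster
-- what changed: The quadratic cancellation (scan name2 and rebuild both strings with replace for every char of name1) is replaced by one dictionary counting pass over name2 plus one decrement pass over name1 computing the multiset-intersection size, and the mutable while-pop elimination becomes a recursive slice-rebuild survivor function.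
import Mathlib
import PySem

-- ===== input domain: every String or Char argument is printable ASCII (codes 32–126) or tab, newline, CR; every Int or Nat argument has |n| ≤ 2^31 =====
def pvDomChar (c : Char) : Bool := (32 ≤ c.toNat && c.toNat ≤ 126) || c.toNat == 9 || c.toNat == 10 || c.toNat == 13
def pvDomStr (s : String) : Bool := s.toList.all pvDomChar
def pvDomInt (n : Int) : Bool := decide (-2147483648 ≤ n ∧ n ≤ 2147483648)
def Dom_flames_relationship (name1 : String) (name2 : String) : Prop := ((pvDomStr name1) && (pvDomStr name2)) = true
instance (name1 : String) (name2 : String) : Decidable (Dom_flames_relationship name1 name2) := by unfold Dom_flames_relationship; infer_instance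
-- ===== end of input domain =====

-- B replaces A's quadratic replace-scan cancellation by a single char-count dictionary pass
-- (asymptotically faster) and the while-pop elimination by a recursive slice-rebuild.

-- ===== PORT A =====
-- 'for char in name1: if char in name2: name1 = name1.replace(char,"",1); name2 = name2.replace(char,"",1)'
-- cs is the string the for-loop iterates over (the value of name1 at loop entry);
-- 'char in name2' for a 1-char string is element membership; replace(c,"",1) removes the
-- first occurrence of c (no-op if absent) = List.erase.
def pvCancelA : List Char → List Char → List Char → List Char × List Char
  | [], n1, n2 => (n1, n2)
  | c :: cs, n1, n2 =>
    if c ∈ n2 then pvCancelA cs (n1.erase c) (n2.erase c)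
    else pvCancelA cs n1 n2

-- 'while len(flames) > 1: flames.pop((remaining_count - 1) % len(flames))'
-- (fuel-bounded while loop; fuel = the list's length suffices, every round pops one element)
def pvPopLoopAGo : Nat → Int → List String → List String
  | 0, _, fl => fl
  | fuel + 1, r, fl =>
    if 1 < fl.length then
      match PySem.List.pop? fl (PySem.Int.mod (r - 1) (fl.length : Int)) with
      | some p => pvPopLoopAGo fuel r p.2
      | none => fl   -- unreachable: 0 ≤ (r-1) % len < len, so pop? always succeeds
    else fl

def pvPopLoopA (r : Int) (fl : List String) : List String := pvPopLoopAGo fl.length r fl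

def flames_relationship (name1 : String) (name2 : String) : String :=
  let s1 := PySem.Chars.replace (PySem.Chars.lower name1.toList) [' '] []
  let s2 := PySem.Chars.replace (PySem.Chars.lower name2.toList) [' '] []
  let p := pvCancelA s1 s1 s2
  let remaining : Int := (p.1.length : Int) + (p.2.length : Int)
  -- 'return flames[0]': the pop loop ends at a one-element list, headD's default is unreachable
  (pvPopLoopA remaining ["Friends", "Love", "Affection", "Marriage", "Enemies", "Siblings"]).headD ""

-- ===== PORT B =====
-- 'counts = {}; for c in s2: counts[c] = counts.get(c, 0) + 1'
def pvCountB (cs : List Char) : PySem.Dict Char Int :=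
  cs.foldl (fun d c => d.insert c (d.getD c 0 + 1)) PySem.Dict.empty

-- 'for c in s1: if counts.get(c, 0) > 0: counts[c] = counts[c] - 1; common += 1'
-- (counts[c] is guarded by counts.get(c,0) > 0, so getD is exact)
def pvCommonB : List Char → PySem.Dict Char Int → Int → Int
  | [], _, common => common
  | c :: cs, d, common =>
    if d.getD c 0 > 0 then pvCommonB cs (d.insert c (d.getD c 0 - 1)) (common + 1)
    else pvCommonB cs d common

-- 'def survivor(lst, r): if len(lst) <= 1: return lst[0]; i = (r-1) % len(lst); return survivor(lst[:i]+lst[i+1:], r)'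
-- (fuel-bounded recursion; fuel = the list's length suffices, every call drops one element.
-- lst[0] is fl.headD "": every call passes a nonempty list, the default is unreachable)
def pvSurvivorBGo : Nat → List String → Int → String
  | 0, fl, _ => fl.headD ""
  | fuel + 1, fl, r =>
    if fl.length ≤ 1 then fl.headD ""
    else
      pvSurvivorBGo fuel
        (PySem.List.slice fl none (some (PySem.Int.mod (r - 1) (fl.length : Int))) ++
         PySem.List.slice fl (some (PySem.Int.mod (r - 1) (fl.length : Int) + 1)) none) r

def pvSurvivorB (fl : List String) (r : Int) : String := pvSurvivorBGo fl.length fl r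

def flames_relationship_alt (name1 : String) (name2 : String) : String :=
  let s1 := PySem.Chars.replace (PySem.Chars.lower name1.toList) [' '] []
  let s2 := PySem.Chars.replace (PySem.Chars.lower name2.toList) [' '] []
  let common := pvCommonB s1 (pvCountB s2) 0
  let remaining : Int := (s1.length : Int) + (s2.length : Int) - 2 * common
  pvSurvivorB ["Friends", "Love", "Affection", "Marriage", "Enemies", "Siblings"] remaining

-- ===== PRECONDITION & SPEC =====
def Spec_flames_relationship (name1 : String) (name2 : String) (out : String) : Prop := out = flames_relationship_alt name1 name2
instance (name1 : String) (name2 : String) (out : String) : Decidable (Spec_flames_relationship name1 name2 out) := by unfold Spec_flames_relationship; infer_instance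

-- ===== CLAIM (what is proved, stated in full; the proofs are below) =====
def Claim_equal_flames_relationship : Prop := ∀ (name1 : String) (name2 : String), Dom_flames_relationship name1 name2 → Spec_flames_relationship name1 name2 (flames_relationship name1 name2)

-- ===== LEMMAS AND PROOFS =====

-- A's destructive pop loop and B's slice-rebuilding survivor remove the same index each round.
theorem go_eq_go (n : Nat) : ∀ (fl : List String) (r : Int), fl.length ≤ n + 1 →
    (pvPopLoopAGo n r fl).headD "" = pvSurvivorBGo n fl r := by
  induction n with
  | zero => intro fl r _; rfl
  | succ n ih =>
    intro fl r hlen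
    by_cases h : fl.length ≤ 1
    · rw [pvPopLoopAGo, pvSurvivorBGo]
      simp [h, show ¬ 1 < fl.length by omega]
    · have h0 : (0 : Int) < (fl.length : Int) := by omega
      have hnn := PySem.Int.mod_nonneg (r - 1) h0
      have hlt := PySem.Int.mod_lt (r - 1) h0
      set i := PySem.Int.mod (r - 1) (fl.length : Int) with hi
      have hin : i = (i.toNat : Int) := by omega
      have hlt' : i.toNat < fl.length := by omega
      have hpop : PySem.List.pop? fl i = some (fl[i.toNat], fl.eraseIdx i.toNat) := by
        have hp := PySem.List.pop?_natCast fl i.toNat hlt'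
        rwa [← hin] at hp
      rw [pvPopLoopAGo, pvSurvivorBGo]
      simp only [show 1 < fl.length by omega, show ¬ fl.length ≤ 1 by omega]
      rw [hpop]
      have hslice : PySem.List.slice fl none (some i) ++ PySem.List.slice fl (some (i + 1)) none
          = fl.eraseIdx i.toNat := by
        have h1 : (i + 1 : Int).toNat = i.toNat + 1 := by omega
        rw [PySem.List.slice_to _ hnn, PySem.List.slice_from _ (by omega), h1,
          List.eraseIdx_eq_take_drop_succ]
      rw [hslice]
      apply ih
      show (fl.eraseIdx i.toNat).length ≤ n + 1
      have := List.length_eraseIdx_of_lt hlt'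
      omega

theorem popLoop_eq_survivor (fl : List String) (r : Int) :
    (pvPopLoopA r fl).headD "" = pvSurvivorB fl r :=
  go_eq_go fl.length fl r (by omega)

-- B's counting dict holds exactly the multiplicities of s2.
theorem countB_getD (cs : List Char) (c : Char) :
    (pvCountB cs).getD c 0 = (cs.count c : Int) := by
  unfold pvCountB
  rw [PySem.Dict.getD_foldl_insert_add_one]
  simp [PySem.Dict.getD_empty]

-- Core invariant: A's cancellation removes exactly as many characters (from each side)
-- as B's decrement loop counts, provided the dict mirrors n2's multiplicities and the
-- remaining iteration characters cs are still present in n1 with enough multiplicity.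
theorem cancel_common (cs : List Char) : ∀ (n1 n2 : List Char) (d : PySem.Dict Char Int) (common : Int),
    (∀ c, d.getD c 0 = (n2.count c : Int)) →
    (∀ c, cs.count c ≤ n1.count c) →
    ((pvCancelA cs n1 n2).1.length : Int) + ((pvCancelA cs n1 n2).2.length : Int)
      = (n1.length : Int) + (n2.length : Int) - 2 * (pvCommonB cs d common - common) := by
  induction cs with
  | nil => intro n1 n2 d common _ _; simp [pvCancelA, pvCommonB]
  | cons c cs ih =>
    intro n1 n2 d common hd hn
    have hcnt2 : d.getD c 0 = (n2.count c : Int) := hd c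
    by_cases hm : c ∈ n2
    · have hpos2 : 0 < n2.count c := List.count_pos_iff.mpr hm
      have hgd : d.getD c 0 > 0 := by omega
      have hc1 : c ∈ n1 := by
        have := hn c
        have : 0 < n1.count c := by
          have : 0 < (c :: cs).count c := by simp
          omega
        exact List.count_pos_iff.mp this
      rw [pvCancelA, pvCommonB]
      simp only [hm, hgd, if_pos]
      have hd' : ∀ x, (d.insert c (d.getD c 0 - 1)).getD x 0 = ((n2.erase c).count x : Int) := by
        intro x
        rw [PySem.Dict.getD_insert]
        by_cases hx : x = c
        · subst hx
          rw [if_pos rfl, hcnt2, List.count_erase_self]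
          omega
        · rw [if_neg hx, hd x, List.count_erase_of_ne hx]
      have hn' : ∀ x, cs.count x ≤ (n1.erase c).count x := by
        intro x
        by_cases hx : x = c
        · subst hx
          have := hn x
          rw [List.count_erase_self]
          simp only [List.count_cons_self] at this
          omega
        · rw [List.count_erase_of_ne hx]
          have := hn x
          have hle : cs.count x ≤ (c :: cs).count x := by
            rw [List.count_cons]; split <;> omega
          omega
      have := ih (n1.erase c) (n2.erase c) (d.insert c (d.getD c 0 - 1)) (common + 1) hd' hn'
      rw [this, List.length_erase_of_mem hc1, List.length_erase_of_mem hm]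
      have h1 : 1 ≤ n1.length := List.length_pos_of_mem hc1
      have h2 : 1 ≤ n2.length := List.length_pos_of_mem hm
      omega
    · have hz : n2.count c = 0 := List.count_eq_zero.mpr hm
      have hgd : ¬ d.getD c 0 > 0 := by omega
      rw [pvCancelA, pvCommonB]
      simp only [hm, hgd, if_neg, not_false_iff]
      apply ih n1 n2 d common hd
      intro x
      have := hn x
      have hle : cs.count x ≤ (c :: cs).count x := by
        rw [List.count_cons]; split <;> omega
      omega

-- ===== VERDICT (by name: the statement is the Claim_ definition above) =====
theorem flames_relationship_spec : Claim_equal_flames_relationship := by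
  intro name1 name2 _
  unfold Spec_flames_relationship flames_relationship flames_relationship_alt
  set s1 := PySem.Chars.replace (PySem.Chars.lower name1.toList) [' '] [] with hs1
  set s2 := PySem.Chars.replace (PySem.Chars.lower name2.toList) [' '] [] with hs2
  have hkey := cancel_common s1 s1 s2 (pvCountB s2) 0
    (fun c => countB_getD s2 c) (fun c => le_refl _)
  rw [popLoop_eq_survivor]
  congr 1
  rw [hkey]
  ring
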